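-- pv_equiv track=rewrite | github.com/firebird641/SHA-4 | SHA-4.py | transform_cube
-- ===== SOURCE A (Python) =====
-- def cube_selector(cube, x_pos, y_pos, z_pos, x_size, y_size, z_size):
--     xor = 0
--     selection = [[2, 1, -3],
--                  [-4, -3, -3],
--                  [0, 2, -1],
--                  [0, 3, -1],
--                  [-2, 0, -2],
--                  [1, -4, 1],
--                  [-1, -1, 3],
--                  [-4, -4, -2]]
--     for coord in selection:
--         xor += int(cube[(x_pos+coord[0]) % x_size][(y_pos+coord[1]) % y_size][(z_pos+coord[2]) % z_size])
--     final = xor % 2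
--     return final
--
-- def transform_cube(cube,x_size,y_size,z_size):
--     cube_transformed = [[[0 for _ in range(z_size)] for _ in range(y_size)] for _ in range(x_size)]
--     for x in range(len(cube)):
--         for y in range(len(cube[x])):
--             for z in range(len(cube[x][y])):
--                 selector_sum = cube_selector(cube, x, y, z, x_size, y_size, z_size)
--                 new = (int(cube[x][y][z])+selector_sum) % 2
--                 cube_transformed[x][y][z] = str(new)
--     return cube_transformed
-- ===== SOURCE B (Python) =====
-- OFFSETS = [(2, 1, -3), (-4, -3, -3), (0, 2, -1), (0, 3, -1),
--            (-2, 0, -2), (1, -4, 1), (-1, -1, 3), (-4, -4, -2)]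
--
--
-- def rot(seq, k):
--     """Cyclic left rotation by k (any sign); no-op on an empty sequence."""
--     if not seq:
--         return seq
--     k %= len(seq)
--     return seq[k:] + seq[:k]
--
--
-- def transform_cube(cube, x_size, y_size, z_size):
--     # Whole-cube rotate-and-XOR: for every offset build the cyclically
--     # rotated bit cube by slicing (no per-cell modular index arithmetic)
--     # and fold it into the accumulator with zip-wise XOR; finally emit the
--     # size-shaped string cube.
--     bits = [[[int(c) & 1 for c in row] for row in plane] for plane in cube]
--     acc = bits
--     for dx, dy, dz in OFFSETS:
--         shifted = [[rot(r, dz) for r in rot(p, dy)] for p in rot(bits, dx)]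
--         acc = [[[a ^ b for a, b in zip(ar, br)]
--                 for ar, br in zip(ap, bp)]
--                for ap, bp in zip(acc, shifted)]
--     return [[[str(acc[x][y][z]) for z in range(z_size)]
--              for y in range(y_size)]
--             for x in range(x_size)]
-- ===== Notes on version B (the rewrite author's own statement) =====
-- stated objective: alternative
-- what changed: Instead of A's per-cell triple loop that gathers 8 neighbours via modular index arithmetic (cube_selector) into a preallocated zero cube, B builds, for each of the 8 offsets, a whole cyclically-rotated bit cube by list slicing (rot = seq[k:]+seq[:k] on each axis) and folds these into an accumulator with zip-wise XOR, finally emitting the size-shaped string cube; no modular indexing or per-cell neighbour gathering remains.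
-- outside the precondition, e.g. on transform_cube([], 1, 1, 1): A returns [[[0]]], B raises IndexError; on transform_cube([[[]]], 1, 1, 1): A returns [[[0]]], B raises IndexError
import Mathlib
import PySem

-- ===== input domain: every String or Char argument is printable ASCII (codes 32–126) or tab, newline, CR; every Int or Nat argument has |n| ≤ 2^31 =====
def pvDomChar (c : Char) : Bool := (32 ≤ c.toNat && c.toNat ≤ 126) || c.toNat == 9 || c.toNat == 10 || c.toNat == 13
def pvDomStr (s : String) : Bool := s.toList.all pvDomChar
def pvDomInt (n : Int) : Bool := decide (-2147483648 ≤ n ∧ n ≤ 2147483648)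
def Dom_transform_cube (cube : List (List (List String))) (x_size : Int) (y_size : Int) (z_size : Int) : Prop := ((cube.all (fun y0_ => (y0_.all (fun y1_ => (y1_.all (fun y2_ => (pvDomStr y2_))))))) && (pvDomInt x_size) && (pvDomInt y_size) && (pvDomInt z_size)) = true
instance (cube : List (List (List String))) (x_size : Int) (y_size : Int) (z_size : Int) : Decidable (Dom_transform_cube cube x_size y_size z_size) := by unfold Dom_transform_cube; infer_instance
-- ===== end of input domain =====

-- B replaces A's per-cell 8-neighbour gather with modular index arithmetic by a whole-cube
-- rotate-and-XOR: each offset yields one cyclically rotated bit cube built by list slicing,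
-- folded into an accumulator with zip-wise XOR (alternative decomposition, same cost).

-- ===== PORT A =====
def cube_selector (cube : List (List (List String))) (x_pos : Int) (y_pos : Int) (z_pos : Int) (x_size : Int) (y_size : Int) (z_size : Int) : Int :=
  let selection : List (List Int) :=
    [[2, 1, -3], [-4, -3, -3], [0, 2, -1], [0, 3, -1],
     [-2, 0, -2], [1, -4, 1], [-1, -1, 3], [-4, -4, -2]]
  -- cube[..][..][..] may raise IndexError in Python; pyGetD is exact under Pre_ (all these indices in range)
  let xor : Int := selection.foldl (fun acc coord =>
    acc + ((PySem.Int.ofStr? (PySem.List.pyGetD (PySem.List.pyGetD (PySem.List.pyGetD cube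
        (PySem.Int.mod (x_pos + PySem.List.pyGetD coord 0 0) x_size) [])
        (PySem.Int.mod (y_pos + PySem.List.pyGetD coord 1 0) y_size) [])
        (PySem.Int.mod (z_pos + PySem.List.pyGetD coord 2 0) z_size) "")).getD 0)) 0
  PySem.Int.mod xor 2

-- Python's fresh cube holds the int 0 placeholder; it is represented as "0" here — exact under Pre_,
-- where every placeholder is overwritten (outside Pre_ Python's result keeps int cells, outside the declared type).
-- cube[x] / cube[x][y] / cube[x][y][z] inside the loops use List.getD: the loop bounds keep the index in range.
def transform_cube (cube : List (List (List String))) (x_size : Int) (y_size : Int) (z_size : Int) : List (List (List String)) :=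
  let ct0 : List (List (List String)) :=
    (PySem.List.pyRange 0 x_size 1).map (fun _ =>
      (PySem.List.pyRange 0 y_size 1).map (fun _ =>
        (PySem.List.pyRange 0 z_size 1).map (fun _ => "0")))
  (List.range cube.length).foldl (fun ct (x : Nat) =>
    (List.range ((cube.getD x []).length)).foldl (fun ct (y : Nat) =>
      (List.range (((cube.getD x []).getD y []).length)).foldl (fun ct (z : Nat) =>
        let selector_sum := cube_selector cube (x : Int) (y : Int) (z : Int) x_size y_size z_size
        let new := PySem.Int.mod (((PySem.Int.ofStr? (((cube.getD x []).getD y []).getD z "")).getD 0) + selector_sum) 2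
        PySem.List.pySetD ct (x : Int)
          (PySem.List.pySetD (PySem.List.pyGetD ct (x : Int) []) (y : Int)
            (PySem.List.pySetD (PySem.List.pyGetD (PySem.List.pyGetD ct (x : Int) []) (y : Int) []) (z : Int)
              (PySem.Int.toStr new)))) ct) ct) ct0

-- ===== PORT B =====
-- rot(seq, k): cyclic left rotation by k, a no-op on an empty sequence
def tc_rot {α : Type} (seq : List α) (k : Int) : List α :=
  if seq.isEmpty then seq
  else
    let k2 := PySem.Int.mod k ((seq.length : Nat) : Int)
    PySem.List.slice seq (some k2) none ++ PySem.List.slice seq none (some k2)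

-- bits = [[[int(c) & 1 for c in row] for row in plane] for plane in cube]
def tc_bits (cube : List (List (List String))) : List (List (List Int)) :=
  cube.map (fun plane => plane.map (fun row => row.map (fun c =>
    PySem.Int.band ((PySem.Int.ofStr? c).getD 0) 1)))

def tc_offsets : List (Int × Int × Int) :=
  [(2, 1, -3), (-4, -3, -3), (0, 2, -1), (0, 3, -1),
   (-2, 0, -2), (1, -4, 1), (-1, -1, 3), (-4, -4, -2)]

-- acc[x][y][z] in the final comprehension may raise IndexError in Python; pyGetD is exact
-- under Pre_ (the comprehension either indexes in range or is empty in that dimension).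
def transform_cube_alt (cube : List (List (List String))) (x_size : Int) (y_size : Int) (z_size : Int) : List (List (List String)) :=
  let bits := tc_bits cube
  let acc := tc_offsets.foldl (fun acc d =>
    let shifted := (tc_rot bits d.1).map (fun p => (tc_rot p d.2.1).map (fun r => tc_rot r d.2.2))
    (acc.zip shifted).map (fun pp =>
      (pp.1.zip pp.2).map (fun rr =>
        (rr.1.zip rr.2).map (fun ab => PySem.Int.bxor ab.1 ab.2)))) bits
  (PySem.List.pyRange 0 x_size 1).map (fun x =>
    (PySem.List.pyRange 0 y_size 1).map (fun y =>
      (PySem.List.pyRange 0 z_size 1).map (fun z =>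
        PySem.Int.toStr (PySem.List.pyGetD (PySem.List.pyGetD (PySem.List.pyGetD acc x []) y []) z 0))))

-- ===== PRECONDITION & SPEC =====
-- the cube matches the size arguments exactly and every cell parses as an int
def PreShape (cube : List (List (List String))) (x_size : Int) (y_size : Int) (z_size : Int) : Prop :=
  (cube.length : Int) = x_size ∧
  ∀ plane ∈ cube, ((plane.length : Int) = y_size ∧
    ∀ row ∈ plane, ((row.length : Int) = z_size ∧
      ∀ c ∈ row, (PySem.Int.ofStr? c).isSome = true))

-- the cube has no cells and at least one size is ≤ 0 (the result is an all-empty skeleton)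
def PreDegen (cube : List (List (List String))) (x_size : Int) (y_size : Int) (z_size : Int) : Prop :=
  (∀ plane ∈ cube, ∀ row ∈ plane, row = ([] : List String)) ∧
  (x_size ≤ 0 ∨ y_size ≤ 0 ∨ z_size ≤ 0)

-- Pre_ excludes (a) shape/size mismatches on which Python A raises or returns a cube still containing
-- int 0 placeholders (not values of the declared List-of-str type), (b) cells int() cannot parse, where
-- A raises ValueError. Inside Pre_ are the exact-shape inputs and the no-cell inputs whose result is an
-- all-empty skeleton shaped by the size arguments.
def Pre_transform_cube (cube : List (List (List String))) (x_size : Int) (y_size : Int) (z_size : Int) : Prop :=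
  PreShape cube x_size y_size z_size ∨ PreDegen cube x_size y_size z_size
instance (cube : List (List (List String))) (x_size : Int) (y_size : Int) (z_size : Int) : Decidable (Pre_transform_cube cube x_size y_size z_size) := by unfold Pre_transform_cube PreShape PreDegen; infer_instance

def pvWitness_transform_cube : List (List (List String)) × Int × Int × Int :=
  ([[["1", "0"], ["0", "1"]]], 1, 2, 2)

def Spec_transform_cube (cube : List (List (List String))) (x_size : Int) (y_size : Int) (z_size : Int) (out : List (List (List String))) : Prop := out = transform_cube_alt cube x_size y_size z_size
instance (cube : List (List (List String))) (x_size : Int) (y_size : Int) (z_size : Int) (out : List (List (List String))) : Decidable (Spec_transform_cube cube x_size y_size z_size out) := by unfold Spec_transform_cube; infer_instance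

-- ===== CLAIM (what is proved, stated in full; the proofs are below) =====
def Claim_equal_transform_cube : Prop := ∀ (cube : List (List (List String))) (x_size : Int) (y_size : Int) (z_size : Int), Dom_transform_cube cube x_size y_size z_size → Pre_transform_cube cube x_size y_size z_size → Spec_transform_cube cube x_size y_size z_size (transform_cube cube x_size y_size z_size)

-- ===== LEMMAS AND PROOFS =====

-- three-dimensional cell access and shape
def get3 {α : Type} (l : List (List (List α))) (x y z : Nat) (d : α) : α :=
  ((l.getD x []).getD y []).getD z d

def Shape3 {α : Type} (l : List (List (List α))) (X Y Z : Nat) : Prop :=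
  l.length = X ∧ ∀ p ∈ l, (p.length = Y ∧ ∀ r ∈ p, r.length = Z)

def cubeMap {α : Type} (X Y Z : Nat) (f : Nat → Nat → Nat → α) : List (List (List α)) :=
  (List.range X).map (fun x => (List.range Y).map (fun y => (List.range Z).map (fun z => f x y z)))

theorem shape_cubeMap {α : Type} (X Y Z : Nat) (f : Nat → Nat → Nat → α) :
    Shape3 (cubeMap X Y Z f) X Y Z := by
  refine ⟨by simp [cubeMap], ?_⟩
  intro p hp
  simp only [cubeMap, List.mem_map] at hp
  obtain ⟨x, -, rfl⟩ := hp
  refine ⟨by simp, ?_⟩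
  intro r hr
  simp only [List.mem_map] at hr
  obtain ⟨y, -, rfl⟩ := hr
  simp

theorem get3_cubeMap {α : Type} {X Y Z x y z : Nat} (f : Nat → Nat → Nat → α) (d : α)
    (hx : x < X) (hy : y < Y) (hz : z < Z) :
    get3 (cubeMap X Y Z f) x y z d = f x y z := by
  simp [get3, cubeMap, List.getD, hx, hy, hz]

theorem cubeMap_congr {α : Type} {X Y Z : Nat} {f g : Nat → Nat → Nat → α}
    (h : ∀ x < X, ∀ y < Y, ∀ z < Z, f x y z = g x y z) :
    cubeMap X Y Z f = cubeMap X Y Z g := by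
  unfold cubeMap
  refine List.map_congr_left (fun x hx => ?_)
  refine List.map_congr_left (fun y hy => ?_)
  refine List.map_congr_left (fun z hz => ?_)
  exact h x (List.mem_range.mp hx) y (List.mem_range.mp hy) z (List.mem_range.mp hz)

theorem cubeMap_ext {α : Type} {X Y Z : Nat} {l : List (List (List α))} (d : α)
    (h : Shape3 l X Y Z) :
    l = cubeMap X Y Z (fun x y z => get3 l x y z d) := by
  obtain ⟨hlen, hmem⟩ := h
  apply List.ext_getElem (by simp [cubeMap, hlen])
  intro x hx1 hx2
  have hxX : x < X := by omega
  have hp := hmem l[x] (List.getElem_mem hx1)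
  apply List.ext_getElem
  · simpa [cubeMap, hxX] using hp.1
  intro y hy1 hy2
  have hyY : y < Y := by rw [hp.1] at hy1; exact hy1
  have hr := hp.2 l[x][y] (List.getElem_mem hy1)
  apply List.ext_getElem
  · simpa [cubeMap, hxX, hyY] using hr
  intro z hz1 hz2
  have hzZ : z < Z := by rw [hr] at hz1; exact hz1
  have : get3 l x y z d = l[x][y][z] := by
    simp [get3, List.getD, hx1, hy1, hz1]
  simp [cubeMap, this]

-- loop-shape lemmas (A side)
theorem foldl_congr_inv {α β : Type} (P : α → Prop) (f g : α → β → α)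
    (hpres : ∀ a b, P a → P (g a b)) :
    ∀ (l : List β) (a : α), P a → (∀ a b, P a → b ∈ l → f a b = g a b) →
      l.foldl f a = l.foldl g a := by
  intro l
  induction l with
  | nil => intro a _ _; rfl
  | cons b l ih =>
    intro a ha hfg
    simp only [List.foldl_cons]
    rw [hfg a b ha (List.mem_cons_self), ih (g a b) (hpres a b ha)
      (fun a' b' ha' hb' => hfg a' b' ha' (List.mem_cons_of_mem _ hb'))]

theorem foldl_set_focus {α β : Type} (d : α) (x : Nat) (step : β → α → α) :
    ∀ (ys : List β) (l : List α), x < l.length →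
      ys.foldl (fun l y => l.set x (step y (l.getD x d))) l
        = l.set x (ys.foldl (fun p y => step y p) (l.getD x d)) := by
  intro ys
  induction ys with
  | nil =>
    intro l h
    simp only [List.foldl_nil]
    rw [List.getD_eq_getElem l d h, List.set_getElem_self]
  | cons y ys ih =>
    intro l h
    simp only [List.foldl_cons]
    rw [ih (l.set x (step y (l.getD x d))) (by simpa using h)]
    have hg : (l.set x (step y (l.getD x d))).getD x d = step y (l.getD x d) := by
      simp [List.getD, h]
    rw [hg, List.set_set]

theorem foldl_set_range {α : Type} (d : α) (f : Nat → α → α) :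
    ∀ (n : Nat) (l : List α), n ≤ l.length →
      (List.range n).foldl (fun l i => l.set i (f i (l.getD i d))) l
        = (List.range n).map (fun i => f i (l.getD i d)) ++ l.drop n := by
  intro n
  induction n with
  | zero => intro l _; simp
  | succ n ih =>
    intro l h
    rw [List.range_succ, List.foldl_append, ih l (by omega), List.map_append,
      List.foldl_cons, List.foldl_nil]
    have hn : n < l.length := by omega
    have hdrop : l.drop n = l[n] :: l.drop (n + 1) := List.drop_eq_getElem_cons hn
    have hlen : ((List.range n).map (fun i => f i (l.getD i d))).length = n := by simp
    have hgetD : ((List.range n).map (fun i => f i (l.getD i d)) ++ l.drop n).getD n d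
        = l.getD n d := by
      rw [hdrop]
      have : ((List.range n).map (fun i => f i (l.getD i d)) ++ l[n] :: l.drop (n + 1)).getD n d
          = l[n] := by
        rw [List.getD, List.getElem?_append_right (by omega)]
        simp [List.getElem?_eq_getElem hn]
      rw [this, List.getD_eq_getElem l d hn]
    rw [hgetD, hdrop]
    rw [show ((List.range n).map (fun i => f i (l.getD i d)) ++ l[n] :: l.drop (n + 1)).set n
          (f n (l.getD n d))
        = (List.range n).map (fun i => f i (l.getD i d)) ++ (l[n] :: l.drop (n + 1)).set 0
          (f n (l.getD n d)) by
      rw [List.set_append]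
      simp]
    rw [List.append_assoc]
    rfl

-- shape bookkeeping
theorem shape_getD_plane {α : Type} {l : List (List (List α))} {X Y Z x : Nat}
    (h : Shape3 l X Y Z) (hx : x < X) : (l.getD x []).length = Y := by
  have hxl : x < l.length := h.1 ▸ hx
  rw [List.getD_eq_getElem _ _ hxl]
  exact (h.2 _ (List.getElem_mem hxl)).1

theorem shape_getD_row {α : Type} {l : List (List (List α))} {X Y Z x y : Nat}
    (h : Shape3 l X Y Z) (hx : x < X) (hy : y < Y) : ((l.getD x []).getD y []).length = Z := by
  have hxl : x < l.length := h.1 ▸ hx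
  have hp := h.2 _ (List.getElem_mem hxl)
  rw [List.getD_eq_getElem _ _ hxl]
  have hyl : y < l[x].length := hp.1 ▸ hy
  rw [List.getD_eq_getElem _ _ hyl]
  exact hp.2 _ (List.getElem_mem hyl)

theorem shape_set_plane {α : Type} {l : List (List (List α))} {X Y Z x y : Nat} {w : List α}
    (h : Shape3 l X Y Z) (hx : x < X) (_hy : y < Y) (hw : w.length = Z) :
    Shape3 (l.set x ((l.getD x []).set y w)) X Y Z := by
  have hxl : x < l.length := h.1 ▸ hx
  refine ⟨by simp [h.1], ?_⟩
  intro p hp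
  rcases List.mem_or_eq_of_mem_set hp with hm | rfl
  · exact h.2 p hm
  · refine ⟨by rw [List.length_set]; exact shape_getD_plane h hx, ?_⟩
    intro r hr
    rcases List.mem_or_eq_of_mem_set hr with hm | rfl
    · refine (h.2 _ ?_).2 r hm
      rw [List.getD_eq_getElem _ _ hxl]
      exact List.getElem_mem hxl
    · exact hw

theorem triple_fold {α : Type} (d : α) {X Y Z : Nat} (v : Nat → Nat → Nat → α → α) :
    ∀ (l : List (List (List α))), Shape3 l X Y Z →
      (List.range X).foldl (fun ct x =>
        (List.range Y).foldl (fun ct y =>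
          (List.range Z).foldl (fun ct z =>
            ct.set x ((ct.getD x []).set y (((ct.getD x []).getD y []).set z
              (v x y z (((ct.getD x []).getD y []).getD z d))))) ct) ct) l
      = cubeMap X Y Z (fun x y z => v x y z (((l.getD x []).getD y []).getD z d)) := by
  intro l hl
  have hbody : ∀ (ct : List (List (List α))) (x : Nat), Shape3 ct X Y Z → x ∈ List.range X →
      (List.range Y).foldl (fun ct y =>
        (List.range Z).foldl (fun ct z =>
          ct.set x ((ct.getD x []).set y (((ct.getD x []).getD y []).set z
            (v x y z (((ct.getD x []).getD y []).getD z d))))) ct) ct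
      = ct.set x ((List.range Y).map (fun y => (List.range Z).map
          (fun z => v x y z (((ct.getD x []).getD y []).getD z d)))) := by
    intro ct x hct hxm
    have hx : x < X := List.mem_range.mp hxm
    have hxl : x < ct.length := hct.1 ▸ hx
    have hz : ∀ (ct' : List (List (List α))) (y : Nat), Shape3 ct' X Y Z → y ∈ List.range Y →
        (List.range Z).foldl (fun ct z =>
          ct.set x ((ct.getD x []).set y (((ct.getD x []).getD y []).set z
            (v x y z (((ct.getD x []).getD y []).getD z d))))) ct'
        = ct'.set x ((ct'.getD x []).set y ((List.range Z).map
            (fun z => v x y z (((ct'.getD x []).getD y []).getD z d)))) := by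
      intro ct' y hct' hym
      have hy : y < Y := List.mem_range.mp hym
      have hxl' : x < ct'.length := hct'.1 ▸ hx
      rw [foldl_set_focus ([] : List (List α)) x
        (fun z p => p.set y ((p.getD y []).set z (v x y z ((p.getD y []).getD z d))))
        (List.range Z) ct' hxl']
      have hyl : y < (ct'.getD x []).length := by rw [shape_getD_plane hct' hx]; exact hy
      rw [foldl_set_focus ([] : List α) y
        (fun z r => r.set z (v x y z (r.getD z d))) (List.range Z) (ct'.getD x []) hyl]
      have hrl : ((ct'.getD x []).getD y []).length = Z := shape_getD_row hct' hx hy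
      rw [foldl_set_range d (fun z old => v x y z old) Z ((ct'.getD x []).getD y [])
        (by omega)]
      rw [show ((ct'.getD x []).getD y []).drop Z = [] by
        rw [← hrl]; exact List.drop_length]
      simp
    rw [foldl_congr_inv (fun ct => Shape3 ct X Y Z) _
      (fun ct y => ct.set x ((ct.getD x []).set y ((List.range Z).map
        (fun z => v x y z (((ct.getD x []).getD y []).getD z d)))))
      (fun ct y hct' => by
        show Shape3 (ct.set x ((ct.getD x []).set y ((List.range Z).map
          (fun z => v x y z (((ct.getD x []).getD y []).getD z d))))) X Y Z
        by_cases hy : y < Y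
        · exact shape_set_plane hct' hx hy (by simp)
        · have h1 : y ≥ (ct.getD x []).length := by rw [shape_getD_plane hct' hx]; omega
          rw [List.set_eq_of_length_le h1]
          have hxl' : x < ct.length := hct'.1 ▸ hx
          rw [List.getD_eq_getElem _ _ hxl', List.set_getElem_self]
          exact hct')
      (List.range Y) ct hct hz]
    rw [foldl_set_focus ([] : List (List α)) x
      (fun y p => p.set y ((List.range Z).map (fun z => v x y z ((p.getD y []).getD z d))))
      (List.range Y) ct hxl]
    have hpl : (ct.getD x []).length = Y := shape_getD_plane hct hx
    rw [foldl_set_range ([] : List α)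
      (fun y old => (List.range Z).map (fun z => v x y z (old.getD z d))) Y (ct.getD x [])
      (by omega)]
    rw [show (ct.getD x []).drop Y = [] by rw [← hpl]; exact List.drop_length]
    simp
  rw [foldl_congr_inv (fun ct => Shape3 ct X Y Z) _
    (fun ct x => ct.set x ((List.range Y).map (fun y => (List.range Z).map
      (fun z => v x y z (((ct.getD x []).getD y []).getD z d)))))
    (fun ct x hct => by
      show Shape3 (ct.set x ((List.range Y).map (fun y => (List.range Z).map
        (fun z => v x y z (((ct.getD x []).getD y []).getD z d))))) X Y Z
      by_cases hx : x < X
      · refine ⟨by simp [hct.1], ?_⟩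
        intro p hp
        rcases List.mem_or_eq_of_mem_set hp with hm | rfl
        · exact hct.2 p hm
        · refine ⟨by simp, ?_⟩
          intro r hr
          simp only [List.mem_map] at hr
          obtain ⟨y, -, rfl⟩ := hr
          simp
      · have : x ≥ ct.length := by rw [hct.1]; omega
        rw [List.set_eq_of_length_le this]
        exact hct)
    (List.range X) l hl hbody]
  rw [foldl_set_range ([] : List (List α))
    (fun x old => (List.range Y).map (fun y => (List.range Z).map
      (fun z => v x y z ((old.getD y []).getD z d)))) X l (by exact hl.1.ge : X ≤ l.length)]
  rw [show l.drop X = [] by rw [← hl.1]; exact List.drop_length]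
  simp [cubeMap]

theorem shape_of_pre {cube : List (List (List String))} {x_size y_size z_size : Int}
    (h : PreShape cube x_size y_size z_size) :
    Shape3 cube cube.length y_size.toNat z_size.toNat := by
  refine ⟨rfl, ?_⟩
  intro p hp
  refine ⟨by have := (h.2 p hp).1; omega, ?_⟩
  intro r hr
  have := ((h.2 p hp).2 r hr).1
  omega

theorem shape_tc_bits {cube : List (List (List String))} {X Y Z : Nat}
    (hs : Shape3 cube X Y Z) : Shape3 (tc_bits cube) X Y Z := by
  refine ⟨by simpa [tc_bits] using hs.1, ?_⟩
  intro p hp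
  simp only [tc_bits, List.mem_map] at hp
  obtain ⟨q, hq, rfl⟩ := hp
  refine ⟨by simpa using (hs.2 q hq).1, ?_⟩
  intro r hr
  simp only [List.mem_map] at hr
  obtain ⟨r0, hr0, rfl⟩ := hr
  simpa using (hs.2 q hq).2 r0 hr0

-- A rewritten as a pointwise cube construction
theorem A_eq (cube : List (List (List String))) (x_size y_size z_size : Int)
    (h : PreShape cube x_size y_size z_size) :
    transform_cube cube x_size y_size z_size
      = cubeMap cube.length y_size.toNat z_size.toNat (fun x y z =>
          PySem.Int.toStr (PySem.Int.mod
            ((PySem.Int.ofStr? (((cube.getD x []).getD y []).getD z "")).getD 0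
              + cube_selector cube (x : Int) (y : Int) (z : Int) x_size y_size z_size) 2)) := by
  have hs := shape_of_pre h
  have hct0 : ((PySem.List.pyRange 0 x_size 1).map (fun _ =>
      (PySem.List.pyRange 0 y_size 1).map (fun _ =>
        (PySem.List.pyRange 0 z_size 1).map (fun _ => "0"))))
      = cubeMap cube.length y_size.toNat z_size.toNat (fun _ _ _ => ("0" : String)) := by
    simp [cubeMap, PySem.List.pyRange_one, List.map_map, Function.comp_def, ← h.1]
  simp only [transform_cube, PySem.List.pySetD_natCast, PySem.List.pyGetD_natCast]
  rw [hct0]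
  rw [PySem.List.foldl_congr_mem (List.range cube.length) _
    (fun ct (x : Nat) => (List.range y_size.toNat).foldl (fun ct (y : Nat) =>
      (List.range z_size.toNat).foldl (fun ct (z : Nat) =>
        ct.set x ((ct.getD x []).set y (((ct.getD x []).getD y []).set z
          (PySem.Int.toStr (PySem.Int.mod
            ((PySem.Int.ofStr? (((cube.getD x []).getD y []).getD z "")).getD 0
              + cube_selector cube (x : Int) (y : Int) (z : Int) x_size y_size z_size) 2))))) ct) ct)
    (cubeMap cube.length y_size.toNat z_size.toNat (fun _ _ _ => ("0" : String)))
    (fun acc x hxm => by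
      have hx : x < cube.length := List.mem_range.mp hxm
      show (List.range ((cube.getD x []).length)).foldl _ acc = _
      rw [shape_getD_plane hs hx]
      exact PySem.List.foldl_congr_mem (List.range y_size.toNat) _ _ acc
        (fun acc' y hym => by
          show (List.range (((cube.getD x []).getD y []).length)).foldl _ acc' = _
          rw [shape_getD_row hs hx (List.mem_range.mp hym)]))]
  have TF := triple_fold ("0" : String) (fun (x y z : Nat) (_ : String) =>
      PySem.Int.toStr (PySem.Int.mod
        ((PySem.Int.ofStr? (((cube.getD x []).getD y []).getD z "")).getD 0
          + cube_selector cube (x : Int) (y : Int) (z : Int) x_size y_size z_size) 2))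
    (cubeMap cube.length y_size.toNat z_size.toNat (fun _ _ _ => ("0" : String)))
    (shape_cubeMap _ _ _ _)
  beta_reduce at TF
  exact TF

-- B side: rotation semantics
theorem tc_rot_nil {α : Type} (k : Int) : tc_rot ([] : List α) k = [] := by
  simp [tc_rot]

theorem tc_rot_eq_rotate {α : Type} (l : List α) (k : Int) (h : l ≠ []) :
    tc_rot l k = l.rotate (PySem.Int.mod k (l.length : Int)).toNat := by
  have hpos : (0 : Int) < (l.length : Int) := by
    have := List.length_pos_iff.mpr h
    exact_mod_cast this
  have h0 := PySem.Int.mod_nonneg k hpos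
  have h1 := PySem.Int.mod_lt k hpos
  have hle : (PySem.Int.mod k (l.length : Int)).toNat ≤ l.length := by omega
  rw [List.rotate_eq_drop_append_take hle]
  simp only [tc_rot, List.isEmpty_iff, if_neg h]
  rw [PySem.List.slice_from l h0, PySem.List.slice_to l h0]

theorem length_tc_rot {α : Type} (l : List α) (k : Int) : (tc_rot l k).length = l.length := by
  by_cases h : l = []
  · subst h; simp [tc_rot_nil]
  · rw [tc_rot_eq_rotate l k h, List.length_rotate]

theorem getElem_tc_rot {α : Type} (l : List α) (k : Int) (i : Nat) (hi : i < l.length) :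
    (tc_rot l k)[i]'(by rw [length_tc_rot]; exact hi)
      = l[(i + (PySem.Int.mod k (l.length : Int)).toNat) % l.length]'
          (Nat.mod_lt _ (by omega)) := by
  have h : l ≠ [] := by intro h; subst h; simp at hi
  have := List.getElem_rotate l (PySem.Int.mod k (l.length : Int)).toNat i
    (by rw [List.length_rotate]; exact hi)
  simp only [tc_rot_eq_rotate l k h]
  exact this

theorem mem_tc_rot {α : Type} {l : List α} {a : α} {k : Int} (h : a ∈ tc_rot l k) : a ∈ l := by
  by_cases hl : l = []
  · subst hl; rw [tc_rot_nil] at h; exact h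
  · rw [tc_rot_eq_rotate l k hl] at h
    exact List.mem_rotate.mp h

-- Nat-side reduction of a wrapped index equals Python's modular index
theorem natmod_int (x X : Nat) (d : Int) (hx : x < X) :
    (PySem.Int.mod ((x : Int) + d) ((X : Nat) : Int)).toNat
      = (x + (PySem.Int.mod d ((X : Nat) : Int)).toNat) % X := by
  have hX : (0 : Int) < (X : Int) := by exact_mod_cast (show 0 < X by omega)
  have h0 := PySem.Int.mod_nonneg d hX
  have h1 := PySem.Int.mod_lt d hX
  have h0' := PySem.Int.mod_nonneg ((x : Int) + d) hX
  simp only [PySem.Int.mod_eq_emod_of_pos hX] at *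
  have hd : (x : Int) + d = ((x : Int) + d % (X : Int)) + (X : Int) * (d / (X : Int)) := by
    have := Int.emod_add_mul_ediv d (X : Int); linarith
  rw [hd, Int.add_mul_emod_self_left]
  have hc : (x : Int) + d % (X : Int) = (((x + (d % (X : Int)).toNat : Nat)) : Int) := by
    push_cast; omega
  rw [hc]
  rw [show (((x + (d % (X : Int)).toNat : Nat)) : Int) % (X : Int)
      = (((x + (d % (X : Int)).toNat) % X : Nat) : Int) from (Int.natCast_mod _ _).symm]
  exact Int.toNat_natCast _

-- a modular triple lookup with pyGetD equals the plain getD lookup at the reduced indices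
theorem chain_mod {α : Type} (d2 : α) {l : List (List (List α))} {X Y Z : Nat}
    (hs : Shape3 l X Y Z) (hX : 0 < X) (hY : 0 < Y) (hZ : 0 < Z) (i j k : Int) :
    PySem.List.pyGetD (PySem.List.pyGetD (PySem.List.pyGetD l
      (PySem.Int.mod i (X : Int)) []) (PySem.Int.mod j (Y : Int)) [])
      (PySem.Int.mod k (Z : Int)) d2
    = ((l.getD (PySem.Int.mod i (X : Int)).toNat []).getD
        (PySem.Int.mod j (Y : Int)).toNat []).getD (PySem.Int.mod k (Z : Int)).toNat d2 := by
  have hXc : (0:Int) < (X : Int) := by exact_mod_cast hX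
  have hYc : (0:Int) < (Y : Int) := by exact_mod_cast hY
  have hZc : (0:Int) < (Z : Int) := by exact_mod_cast hZ
  have hi0 := PySem.Int.mod_nonneg i hXc
  have hi1 := PySem.Int.mod_lt i hXc
  have hj0 := PySem.Int.mod_nonneg j hYc
  have hj1 := PySem.Int.mod_lt j hYc
  have hk0 := PySem.Int.mod_nonneg k hZc
  have hk1 := PySem.Int.mod_lt k hZc
  have h1 : (PySem.Int.mod i (X : Int)).toNat < l.length := by rw [hs.1]; omega
  rw [PySem.List.pyGetD_eq_getElem l ([] : List (List α)) hi0 (by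
    rw [show ((l.length : Int)) = (X : Int) by exact_mod_cast congrArg Nat.cast hs.1]
    exact hi1)]
  have hpl : l[(PySem.Int.mod i (X : Int)).toNat].length = Y :=
    (hs.2 _ (List.getElem_mem h1)).1
  have h2 : (PySem.Int.mod j (Y : Int)).toNat < l[(PySem.Int.mod i (X : Int)).toNat].length := by
    rw [hpl]; omega
  rw [PySem.List.pyGetD_eq_getElem _ ([] : List α) hj0 (by
    rw [show ((l[(PySem.Int.mod i (X : Int)).toNat].length : Int)) = (Y : Int) by
      exact_mod_cast congrArg Nat.cast hpl]
    exact hj1)]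
  have hrl : l[(PySem.Int.mod i (X : Int)).toNat][(PySem.Int.mod j (Y : Int)).toNat].length = Z :=
    (hs.2 _ (List.getElem_mem h1)).2 _ (List.getElem_mem h2)
  have h3 : (PySem.Int.mod k (Z : Int)).toNat
      < l[(PySem.Int.mod i (X : Int)).toNat][(PySem.Int.mod j (Y : Int)).toNat].length := by
    rw [hrl]; omega
  rw [PySem.List.pyGetD_eq_getElem _ d2 hk0 (by
    rw [show ((l[(PySem.Int.mod i (X : Int)).toNat][(PySem.Int.mod j (Y : Int)).toNat].length : Int))
        = (Z : Int) by exact_mod_cast congrArg Nat.cast hrl]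
    exact hk1)]
  rw [List.getD_eq_getElem _ _ h1, List.getD_eq_getElem _ _ h2, List.getD_eq_getElem _ _ h3]

-- a cell of the bit cube is the GF(2) bit of the corresponding string cell
theorem bits_chain (cube : List (List (List String))) {X Y Z a b c : Nat}
    (hs : Shape3 cube X Y Z) (ha : a < X) (hb : b < Y) (hc : c < Z) :
    (((tc_bits cube).getD a []).getD b []).getD c 0
    = PySem.Int.band ((PySem.Int.ofStr? (((cube.getD a []).getD b []).getD c "")).getD 0) 1 := by
  have h1 : a < cube.length := hs.1 ▸ ha
  have hpl : cube[a].length = Y := (hs.2 _ (List.getElem_mem h1)).1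
  have h2 : b < cube[a].length := by rw [hpl]; exact hb
  have hrl : cube[a][b].length = Z := (hs.2 _ (List.getElem_mem h1)).2 _ (List.getElem_mem h2)
  have h3 : c < cube[a][b].length := by rw [hrl]; exact hc
  simp only [tc_bits, List.getD, List.getElem?_map, List.getElem?_eq_getElem h1,
    List.getElem?_eq_getElem h2, List.getElem?_eq_getElem h3,
    Option.map_some, Option.getD_some]

theorem bits_chain_mod (cube : List (List (List String))) {X Y Z : Nat}
    (hs : Shape3 cube X Y Z) (hbits : Shape3 (tc_bits cube) X Y Z)
    (hX : 0 < X) (hY : 0 < Y) (hZ : 0 < Z) (i j k : Int) :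
    PySem.List.pyGetD (PySem.List.pyGetD (PySem.List.pyGetD (tc_bits cube)
      (PySem.Int.mod i (X : Int)) []) (PySem.Int.mod j (Y : Int)) [])
      (PySem.Int.mod k (Z : Int)) 0
    = PySem.Int.band ((PySem.Int.ofStr?
        (((cube.getD (PySem.Int.mod i (X : Int)).toNat []).getD
          (PySem.Int.mod j (Y : Int)).toNat []).getD
          (PySem.Int.mod k (Z : Int)).toNat "")).getD 0) 1 := by
  rw [chain_mod (0 : Int) hbits hX hY hZ i j k]
  have hXc : (0:Int) < (X : Int) := by exact_mod_cast hX
  have hYc : (0:Int) < (Y : Int) := by exact_mod_cast hY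
  have hZc : (0:Int) < (Z : Int) := by exact_mod_cast hZ
  have hi1 := PySem.Int.mod_lt i hXc
  have hj1 := PySem.Int.mod_lt j hYc
  have hk1 := PySem.Int.mod_lt k hZc
  exact bits_chain cube hs (by omega) (by omega) (by omega)

-- shapes of the shifted and zipped cubes
theorem shape_shift {X Y Z : Nat} (bits : List (List (List Int))) (d : Int × Int × Int)
    (hb : Shape3 bits X Y Z) :
    Shape3 ((tc_rot bits d.1).map (fun p =>
      (tc_rot p d.2.1).map (fun r => tc_rot r d.2.2))) X Y Z := by
  refine ⟨by simp [length_tc_rot, hb.1], ?_⟩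
  intro p' hp'
  simp only [List.mem_map] at hp'
  obtain ⟨p, hp, rfl⟩ := hp'
  have hpb : p ∈ bits := mem_tc_rot hp
  refine ⟨by simp [length_tc_rot, (hb.2 p hpb).1], ?_⟩
  intro r' hr'
  simp only [List.mem_map] at hr'
  obtain ⟨r, hr, rfl⟩ := hr'
  have hrp : r ∈ p := mem_tc_rot hr
  rw [length_tc_rot]
  exact (hb.2 p hpb).2 r hrp

theorem shape_zipxor {X Y Z : Nat} (a b : List (List (List Int)))
    (ha : Shape3 a X Y Z) (hb : Shape3 b X Y Z) :
    Shape3 ((a.zip b).map (fun pp => (pp.1.zip pp.2).map (fun rr =>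
      (rr.1.zip rr.2).map (fun ab => PySem.Int.bxor ab.1 ab.2)))) X Y Z := by
  refine ⟨by simp [List.length_zip, ha.1, hb.1], ?_⟩
  intro p' hp'
  simp only [List.mem_map] at hp'
  obtain ⟨⟨p, q⟩, hpq, rfl⟩ := hp'
  obtain ⟨hpa, hqb⟩ := List.of_mem_zip hpq
  refine ⟨by simp [List.length_zip, (ha.2 p hpa).1, (hb.2 q hqb).1], ?_⟩
  intro r' hr'
  simp only [List.mem_map] at hr'
  obtain ⟨⟨r, t⟩, hrt, rfl⟩ := hr'
  obtain ⟨hra, htb⟩ := List.of_mem_zip hrt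
  simp [List.length_zip, (ha.2 p hpa).2 r hra, (hb.2 q hqb).2 t htb]

-- cells of the zipped cube
theorem get3_zipxor {X Y Z x y z : Nat} (a b : List (List (List Int)))
    (ha : Shape3 a X Y Z) (hb : Shape3 b X Y Z) (hx : x < X) (hy : y < Y) (hz : z < Z) :
    get3 ((a.zip b).map (fun pp => (pp.1.zip pp.2).map (fun rr =>
        (rr.1.zip rr.2).map (fun ab => PySem.Int.bxor ab.1 ab.2)))) x y z 0
      = PySem.Int.bxor (get3 a x y z 0) (get3 b x y z 0) := by
  have hax : x < a.length := ha.1 ▸ hx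
  have hbx : x < b.length := hb.1 ▸ hx
  have haY : (a[x]'hax).length = Y := (ha.2 _ (List.getElem_mem hax)).1
  have hbY : (b[x]'hbx).length = Y := (hb.2 _ (List.getElem_mem hbx)).1
  have hay : y < (a[x]'hax).length := by omega
  have hby : y < (b[x]'hbx).length := by omega
  have haZ : ((a[x]'hax)[y]'hay).length = Z :=
    (ha.2 _ (List.getElem_mem hax)).2 _ (List.getElem_mem hay)
  have hbZ : ((b[x]'hbx)[y]'hby).length = Z :=
    (hb.2 _ (List.getElem_mem hbx)).2 _ (List.getElem_mem hby)
  have haz : z < ((a[x]'hax)[y]'hay).length := by omega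
  have hbz : z < ((b[x]'hbx)[y]'hby).length := by omega
  have E1 : ((a.zip b).map (fun pp => (pp.1.zip pp.2).map (fun rr =>
        (rr.1.zip rr.2).map (fun ab => PySem.Int.bxor ab.1 ab.2)))).getD x []
      = ((a[x]'hax).zip (b[x]'hbx)).map (fun rr =>
          (rr.1.zip rr.2).map (fun ab => PySem.Int.bxor ab.1 ab.2)) := by
    rw [List.getD_eq_getElem _ _ (by rw [List.length_map, List.length_zip]; omega)]
    rw [List.getElem_map, List.getElem_zip]
  have E2 : (((a[x]'hax).zip (b[x]'hbx)).map (fun rr =>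
        (rr.1.zip rr.2).map (fun ab => PySem.Int.bxor ab.1 ab.2))).getD y []
      = (((a[x]'hax)[y]'hay).zip ((b[x]'hbx)[y]'hby)).map
          (fun ab => PySem.Int.bxor ab.1 ab.2) := by
    rw [List.getD_eq_getElem _ _ (by rw [List.length_map, List.length_zip]; omega)]
    rw [List.getElem_map, List.getElem_zip]
  have E3 : ((((a[x]'hax)[y]'hay).zip ((b[x]'hbx)[y]'hby)).map
        (fun ab => PySem.Int.bxor ab.1 ab.2)).getD z 0
      = PySem.Int.bxor (((a[x]'hax)[y]'hay)[z]'haz) (((b[x]'hbx)[y]'hby)[z]'hbz) := by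
    rw [List.getD_eq_getElem _ _ (by rw [List.length_map, List.length_zip]; omega)]
    rw [List.getElem_map, List.getElem_zip]
  rw [get3, E1, E2, E3]
  rw [show get3 a x y z 0 = ((a[x]'hax)[y]'hay)[z]'haz from by
      rw [get3, List.getD_eq_getElem _ _ hax, List.getD_eq_getElem _ _ hay,
        List.getD_eq_getElem _ _ haz],
    show get3 b x y z 0 = ((b[x]'hbx)[y]'hby)[z]'hbz from by
      rw [get3, List.getD_eq_getElem _ _ hbx, List.getD_eq_getElem _ _ hby,
        List.getD_eq_getElem _ _ hbz]]

-- cells of the rotated cube: rotation wraps each index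
theorem get3_shift {X Y Z x y z : Nat} (bits : List (List (List Int))) (d : Int × Int × Int)
    (hb : Shape3 bits X Y Z) (hx : x < X) (hy : y < Y) (hz : z < Z) :
    get3 ((tc_rot bits d.1).map (fun p =>
        (tc_rot p d.2.1).map (fun r => tc_rot r d.2.2))) x y z 0
      = get3 bits ((x + (PySem.Int.mod d.1 (X : Int)).toNat) % X)
          ((y + (PySem.Int.mod d.2.1 (Y : Int)).toNat) % Y)
          ((z + (PySem.Int.mod d.2.2 (Z : Int)).toNat) % Z) 0 := by
  have hbl : bits.length = X := hb.1
  have hxb : (x + (PySem.Int.mod d.1 (X : Int)).toNat) % X < X := Nat.mod_lt _ (by omega)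
  have hx'b : (x + (PySem.Int.mod d.1 (X : Int)).toNat) % X < bits.length := by omega
  have hpY : (bits[(x + (PySem.Int.mod d.1 (X : Int)).toNat) % X]'hx'b).length = Y :=
    (hb.2 _ (List.getElem_mem hx'b)).1
  have hyb : (y + (PySem.Int.mod d.2.1 (Y : Int)).toNat) % Y < Y := Nat.mod_lt _ (by omega)
  have hy'b : (y + (PySem.Int.mod d.2.1 (Y : Int)).toNat) % Y
      < (bits[(x + (PySem.Int.mod d.1 (X : Int)).toNat) % X]'hx'b).length := by omega
  have hrZ : ((bits[(x + (PySem.Int.mod d.1 (X : Int)).toNat) % X]'hx'b)[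
      (y + (PySem.Int.mod d.2.1 (Y : Int)).toNat) % Y]'hy'b).length = Z :=
    (hb.2 _ (List.getElem_mem hx'b)).2 _ (List.getElem_mem hy'b)
  have hzb : (z + (PySem.Int.mod d.2.2 (Z : Int)).toNat) % Z < Z := Nat.mod_lt _ (by omega)
  have hz'b : (z + (PySem.Int.mod d.2.2 (Z : Int)).toNat) % Z
      < ((bits[(x + (PySem.Int.mod d.1 (X : Int)).toNat) % X]'hx'b)[
        (y + (PySem.Int.mod d.2.1 (Y : Int)).toNat) % Y]'hy'b).length := by omega
  have E1 : ((tc_rot bits d.1).map (fun p =>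
        (tc_rot p d.2.1).map (fun r => tc_rot r d.2.2))).getD x []
      = (tc_rot (bits[(x + (PySem.Int.mod d.1 (X : Int)).toNat) % X]'hx'b) d.2.1).map
          (fun r => tc_rot r d.2.2) := by
    rw [List.getD_eq_getElem _ _ (by rw [List.length_map, length_tc_rot]; omega)]
    rw [List.getElem_map, getElem_tc_rot bits d.1 x (by omega)]
    simp only [hbl]
  have E2 : ((tc_rot (bits[(x + (PySem.Int.mod d.1 (X : Int)).toNat) % X]'hx'b) d.2.1).map
        (fun r => tc_rot r d.2.2)).getD y []
      = tc_rot ((bits[(x + (PySem.Int.mod d.1 (X : Int)).toNat) % X]'hx'b)[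
          (y + (PySem.Int.mod d.2.1 (Y : Int)).toNat) % Y]'hy'b) d.2.2 := by
    rw [List.getD_eq_getElem _ _ (by rw [List.length_map, length_tc_rot]; omega)]
    rw [List.getElem_map,
      getElem_tc_rot (bits[(x + (PySem.Int.mod d.1 (X : Int)).toNat) % X]'hx'b) d.2.1 y
        (by omega)]
    simp only [hpY]
  have E3 : (tc_rot ((bits[(x + (PySem.Int.mod d.1 (X : Int)).toNat) % X]'hx'b)[
        (y + (PySem.Int.mod d.2.1 (Y : Int)).toNat) % Y]'hy'b) d.2.2).getD z 0
      = ((bits[(x + (PySem.Int.mod d.1 (X : Int)).toNat) % X]'hx'b)[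
          (y + (PySem.Int.mod d.2.1 (Y : Int)).toNat) % Y]'hy'b)[
          (z + (PySem.Int.mod d.2.2 (Z : Int)).toNat) % Z]'hz'b := by
    rw [List.getD_eq_getElem _ _ (by rw [length_tc_rot]; omega)]
    rw [getElem_tc_rot _ d.2.2 z (by omega)]
    simp only [hrZ]
  rw [get3, E1, E2, E3]
  rw [get3, List.getD_eq_getElem _ _ hx'b, List.getD_eq_getElem _ _ hy'b,
    List.getD_eq_getElem _ _ hz'b]

-- one rotate-and-zip pass equals the pointwise XOR with the modular lookup
theorem pass_eq {X Y Z : Nat} (xs ys zs : Int) (bits acc : List (List (List Int)))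
    (d : Int × Int × Int) (hb : Shape3 bits X Y Z) (ha : Shape3 acc X Y Z)
    (hxs : 0 < X → xs = (X : Int)) (hys : 0 < Y → ys = (Y : Int))
    (hzs : 0 < Z → zs = (Z : Int)) :
    ((acc.zip ((tc_rot bits d.1).map (fun p =>
        (tc_rot p d.2.1).map (fun r => tc_rot r d.2.2)))).map
      (fun pp => (pp.1.zip pp.2).map (fun rr =>
        (rr.1.zip rr.2).map (fun ab => PySem.Int.bxor ab.1 ab.2))))
    = cubeMap X Y Z (fun x y z => PySem.Int.bxor (get3 acc x y z 0)
        (PySem.List.pyGetD (PySem.List.pyGetD (PySem.List.pyGetD bits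
          (PySem.Int.mod ((x : Int) + d.1) xs) [])
          (PySem.Int.mod ((y : Int) + d.2.1) ys) [])
          (PySem.Int.mod ((z : Int) + d.2.2) zs) 0)) := by
  have hsh := shape_shift bits d hb
  have hzx := shape_zipxor acc _ ha hsh
  refine (cubeMap_ext (0 : Int) hzx).trans (cubeMap_congr ?_)
  intro x hx y hy z hz
  rw [get3_zipxor acc _ ha hsh hx hy hz, get3_shift bits d hb hx hy hz]
  rw [hxs (by omega), hys (by omega), hzs (by omega)]
  congr 1
  rw [chain_mod (0 : Int) hb (by omega) (by omega) (by omega)]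
  rw [natmod_int x X d.1 hx, natmod_int y Y d.2.1 hy, natmod_int z Z d.2.2 hz]
  rfl

-- the whole offset fold equals the pointwise XOR fold
theorem passes_eq {X Y Z : Nat} (xs ys zs : Int) (bits : List (List (List Int)))
    (hb : Shape3 bits X Y Z) (hxs : 0 < X → xs = (X : Int)) (hys : 0 < Y → ys = (Y : Int))
    (hzs : 0 < Z → zs = (Z : Int)) :
    ∀ (ds : List (Int × Int × Int)) (acc : List (List (List Int))), Shape3 acc X Y Z →
      ds.foldl (fun acc d =>
        ((acc.zip ((tc_rot bits d.1).map (fun p =>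
            (tc_rot p d.2.1).map (fun r => tc_rot r d.2.2)))).map
          (fun pp => (pp.1.zip pp.2).map (fun rr =>
            (rr.1.zip rr.2).map (fun ab => PySem.Int.bxor ab.1 ab.2))))) acc
      = cubeMap X Y Z (fun x y z =>
          ds.foldl (fun w d => PySem.Int.bxor w
            (PySem.List.pyGetD (PySem.List.pyGetD (PySem.List.pyGetD bits
              (PySem.Int.mod ((x : Int) + d.1) xs) [])
              (PySem.Int.mod ((y : Int) + d.2.1) ys) [])
              (PySem.Int.mod ((z : Int) + d.2.2) zs) 0))
            (((acc.getD x []).getD y []).getD z 0)) := by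
  intro ds
  induction ds with
  | nil =>
    intro acc hacc
    simp only [List.foldl_nil]
    exact cubeMap_ext (0 : Int) hacc
  | cons d ds ih =>
    intro acc hacc
    rw [List.foldl_cons]
    rw [pass_eq xs ys zs bits acc d hb hacc hxs hys hzs]
    rw [ih _ (shape_cubeMap _ _ _ _)]
    refine cubeMap_congr ?_
    intro x hx y hy z hz
    rw [List.foldl_cons]
    congr 1
    have := get3_cubeMap (X := X) (Y := Y) (Z := Z)
      (fun x y z => PySem.Int.bxor (get3 acc x y z 0)
        (PySem.List.pyGetD (PySem.List.pyGetD (PySem.List.pyGetD bits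
          (PySem.Int.mod ((x : Int) + d.1) xs) [])
          (PySem.Int.mod ((y : Int) + d.2.1) ys) [])
          (PySem.Int.mod ((z : Int) + d.2.2) zs) 0)) (0 : Int) hx hy hz
    simpa [get3] using this

-- B rewritten as a pointwise cube construction
theorem B_eq (cube : List (List (List String))) (x_size y_size z_size : Int)
    (h : PreShape cube x_size y_size z_size) :
    transform_cube_alt cube x_size y_size z_size
      = cubeMap cube.length y_size.toNat z_size.toNat (fun x y z =>
          PySem.Int.toStr (tc_offsets.foldl (fun w d => PySem.Int.bxor w
            (PySem.List.pyGetD (PySem.List.pyGetD (PySem.List.pyGetD (tc_bits cube)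
              (PySem.Int.mod ((x : Int) + d.1) x_size) [])
              (PySem.Int.mod ((y : Int) + d.2.1) y_size) [])
              (PySem.Int.mod ((z : Int) + d.2.2) z_size) 0))
            ((((tc_bits cube).getD x []).getD y []).getD z 0))) := by
  have hxs : x_size = (cube.length : Int) := h.1.symm
  subst hxs
  have hs := shape_of_pre h
  have hbits : Shape3 (tc_bits cube) cube.length y_size.toNat z_size.toNat :=
    shape_tc_bits hs
  simp only [transform_cube_alt]
  rw [passes_eq (cube.length : Int) y_size z_size (tc_bits cube) hbits
    (fun _ => rfl) (fun hY => by omega) (fun hZ => by omega) tc_offsets (tc_bits cube) hbits]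
  -- the final size-shaped comprehension reads exactly the cells of the cubeMap
  simp only [PySem.List.pyRange_one, List.map_map, Function.comp_def, zero_add, sub_zero,
    Int.toNat_natCast, PySem.List.pyGetD_natCast]
  refine List.map_congr_left (fun x hxm => ?_)
  refine List.map_congr_left (fun y hym => ?_)
  refine List.map_congr_left (fun z hzm => ?_)
  congr 1
  have hx := List.mem_range.mp hxm
  have hy := List.mem_range.mp hym
  have hz := List.mem_range.mp hzm
  have := get3_cubeMap (X := cube.length) (Y := y_size.toNat) (Z := z_size.toNat)
    (fun x y z => tc_offsets.foldl (fun w d => PySem.Int.bxor w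
        (PySem.List.pyGetD (PySem.List.pyGetD (PySem.List.pyGetD (tc_bits cube)
          (PySem.Int.mod ((x : Int) + d.1) ((cube.length : Nat) : Int)) [])
          (PySem.Int.mod ((y : Int) + d.2.1) y_size) [])
          (PySem.Int.mod ((z : Int) + d.2.2) z_size) 0))
        ((((tc_bits cube).getD x []).getD y []).getD z 0)) (0 : Int) hx hy hz
  simpa [get3] using this

theorem bxor_mod2 (a b : Int) :
    PySem.Int.bxor (PySem.Int.mod a 2) (PySem.Int.mod b 2) = PySem.Int.mod (a + b) 2 := by
  have h2 : (0:Int) < 2 := by norm_num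
  have ha0 := PySem.Int.mod_nonneg a h2
  have ha1 := PySem.Int.mod_lt a h2
  have hb0 := PySem.Int.mod_nonneg b h2
  have hb1 := PySem.Int.mod_lt b h2
  simp only [PySem.Int.mod_eq_emod_of_pos h2] at *
  have ha : a % 2 = 0 ∨ a % 2 = 1 := by omega
  have hb : b % 2 = 0 ∨ b % 2 = 1 := by omega
  rcases ha with ha | ha <;> rcases hb with hb | hb <;> rw [ha, hb] <;> first
    | (rw [show PySem.Int.bxor 0 0 = 0 from by decide]; omega)
    | (rw [show PySem.Int.bxor 0 1 = 1 from by decide]; omega)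
    | (rw [show PySem.Int.bxor 1 0 = 1 from by decide]; omega)
    | (rw [show PySem.Int.bxor 1 1 = 0 from by decide]; omega)

-- degenerate (no-cell) arm: both loops are vacuous
theorem foldl_id {α β : Type} : ∀ (l : List β) (a : α), l.foldl (fun a _ => a) a = a := by
  intro l
  induction l with
  | nil => intro a; rfl
  | cons b l ih => intro a; simp only [List.foldl_cons]; exact ih a

theorem nocells_get {α : Type} {l : List (List (List α))}
    (h : ∀ p ∈ l, ∀ r ∈ p, r = ([] : List α)) (x y : Nat) :
    (l.getD x []).getD y [] = ([] : List α) := by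
  by_cases hx : x < l.length
  · have hp : l.getD x [] ∈ l := by
      rw [List.getD_eq_getElem _ _ hx]; exact List.getElem_mem hx
    by_cases hy : y < (l.getD x []).length
    · exact h _ hp _ (by rw [List.getD_eq_getElem _ _ hy]; exact List.getElem_mem hy)
    · exact List.getD_eq_default _ _ (by omega)
  · rw [List.getD_eq_default _ _ (by omega : l.length ≤ x)]
    simp

theorem A_degen (cube : List (List (List String))) (x_size y_size z_size : Int)
    (hnc : ∀ plane ∈ cube, ∀ row ∈ plane, row = ([] : List String)) :
    transform_cube cube x_size y_size z_size
      = (PySem.List.pyRange 0 x_size 1).map (fun _ =>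
          (PySem.List.pyRange 0 y_size 1).map (fun _ =>
            (PySem.List.pyRange 0 z_size 1).map (fun _ => "0"))) := by
  simp only [transform_cube]
  rw [PySem.List.foldl_congr_mem (List.range cube.length) _ (fun ct _ => ct) _
    (fun ct x hxm => by
      refine PySem.List.foldl_congr_mem _ _ (fun ct _ => ct) ct
        (fun ct' y hym => ?_) |>.trans (foldl_id _ ct)
      rw [nocells_get hnc x y]
      rfl)]
  rw [foldl_id]

theorem B_degen (cube : List (List (List String))) (x_size y_size z_size : Int)
    (hdeg : x_size ≤ 0 ∨ y_size ≤ 0 ∨ z_size ≤ 0) :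
    transform_cube_alt cube x_size y_size z_size
      = (PySem.List.pyRange 0 x_size 1).map (fun _ =>
          (PySem.List.pyRange 0 y_size 1).map (fun _ =>
            (PySem.List.pyRange 0 z_size 1).map (fun _ => "0"))) := by
  simp only [transform_cube_alt]
  rcases hdeg with h0 | h0 | h0
  · rw [PySem.List.pyRange_one_eq_nil h0]
    simp
  · rw [PySem.List.pyRange_one_eq_nil h0]
    simp
  · rw [PySem.List.pyRange_one_eq_nil h0]
    simp

-- ===== VERDICT (by name: the statement is the Claim_ definition above) =====
theorem transform_cube_spec : Claim_equal_transform_cube := by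
  unfold Claim_equal_transform_cube
  intro cube x_size y_size z_size hdom hpre
  unfold Spec_transform_cube
  rcases hpre with hsh | hdeg
  case inr => rw [A_degen cube _ _ _ hdeg.1, B_degen cube _ _ _ hdeg.2]
  have h1 : (cube.length : Int) = x_size := hsh.1
  subst h1
  rw [A_eq cube _ _ _ hsh, B_eq cube _ _ _ hsh]
  refine cubeMap_congr ?_
  intro x hx y hy z hz
  have hs := shape_of_pre hsh
  have hbits : Shape3 (tc_bits cube) cube.length y_size.toNat z_size.toNat :=
    shape_tc_bits hs
  have hXpos : 0 < cube.length := by omega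
  have hy0 : 0 < y_size := by omega
  have hz0 : 0 < z_size := by omega
  obtain ⟨Y, hYeq⟩ : ∃ n : Nat, y_size = (n : Int) := ⟨y_size.toNat, by omega⟩
  subst hYeq
  obtain ⟨Z, hZeq⟩ : ∃ n : Nat, z_size = (n : Int) := ⟨z_size.toNat, by omega⟩
  subst hZeq
  simp only [Int.toNat_natCast] at hs hbits hy hz ⊢
  have hYpos : 0 < Y := by omega
  have hZpos : 0 < Z := by omega
  have c0 : ∀ a b c : Int, PySem.List.pyGetD [a, b, c] 0 0 = a := fun _ _ _ => rfl
  have c1 : ∀ a b c : Int, PySem.List.pyGetD [a, b, c] 1 0 = b := fun _ _ _ => rfl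
  have c2 : ∀ a b c : Int, PySem.List.pyGetD [a, b, c] 2 0 = c := fun _ _ _ => rfl
  simp only [cube_selector, tc_offsets, List.foldl_cons, List.foldl_nil, c0, c1, c2]
  rw [bits_chain cube hs hx hy hz]
  simp only [chain_mod ("" : String) hs hXpos hYpos hZpos,
    bits_chain_mod cube hs hbits hXpos hYpos hZpos]
  simp only [PySem.Int.band_one, bxor_mod2]
  congr 1
  simp only [PySem.Int.mod_eq_emod_of_pos (by norm_num : (0:Int) < 2)]
  omega
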